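-- pv_equiv track=rewrite | github.com/TheWorldAvatar/mcp-tool-layer | scripts/chemical_fuzzy_search.py | hill_string
-- ===== SOURCE A (Python) =====
-- from collections import Counter
--
-- HILL_ORDER = [
--     "C","H","N","O","F","P","S","Cl","Br","I",
--     "B","Si","Se","Sb","Te","Mo","Co","V","Cu","Pd"
-- ]
--
-- def hill_string(atoms: Counter) -> str:
--     parts = []
--     rest = atoms.copy()
--     c = rest.pop("C", 0); h = rest.pop("H", 0)
--     if c: parts.append("C" + (str(c) if c>1 else ""))
--     if h: parts.append("H" + (str(h) if h>1 else ""))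
--     for e in HILL_ORDER:
--         if e in ("C","H"): continue
--         n = rest.pop(e, 0)
--         if n: parts.append(e + (str(n) if n>1 else ""))
--     for e in sorted(rest):
--         n = rest[e]
--         if n: parts.append(e + (str(n) if n>1 else ""))
--     return "".join(parts) if parts else ""
-- ===== SOURCE B (Python) =====
-- # Simpler re-implementation: one key-sort of the items replaces dict copying/popping and three sequential scans.
-- HILL_ORDER = [
--     "C","H","N","O","F","P","S","Cl","Br","I",
--     "B","Si","Se","Sb","Te","Mo","Co","V","Cu","Pd"
-- ]
--
-- def hill_string(atoms) -> str:
--     rank = {e: i for i, e in enumerate(HILL_ORDER)}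
--
--     def key(item):
--         e = item[0]
--         return str(rank.get(e, len(HILL_ORDER))).zfill(2) + e
--
--     return "".join(
--         e + (str(n) if n > 1 else "")
--         for e, n in sorted(atoms.items(), key=key)
--         if n
--     )
-- ===== Notes on version B (the rewrite author's own statement) =====
-- stated objective: simpler
-- what changed: Instead of copying the Counter and popping keys through three sequential scans (C/H special-cased, then the rest of HILL_ORDER, then sorted leftovers), B sorts atoms.items() once by a rank-based key (zero-padded Hill rank, then element name) and joins the formatted parts in one comprehension, without mutating any dict.
import Mathlib
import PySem

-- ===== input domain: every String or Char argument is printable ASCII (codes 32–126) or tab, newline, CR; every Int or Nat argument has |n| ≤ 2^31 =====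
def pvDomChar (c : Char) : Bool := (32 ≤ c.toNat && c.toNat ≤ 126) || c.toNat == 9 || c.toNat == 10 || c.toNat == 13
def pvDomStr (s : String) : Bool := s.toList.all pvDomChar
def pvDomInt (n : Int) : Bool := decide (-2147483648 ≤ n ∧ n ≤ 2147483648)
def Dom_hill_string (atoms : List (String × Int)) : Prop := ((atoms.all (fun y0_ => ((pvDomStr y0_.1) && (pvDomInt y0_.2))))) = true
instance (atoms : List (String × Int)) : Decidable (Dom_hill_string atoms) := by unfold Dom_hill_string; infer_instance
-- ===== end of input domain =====

-- B replaces A's dict copy + pops + three sequential scans by one key-sort of the items (simpler decomposition; no mutation).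

def pvHILL : List String := [
  "C","H","N","O","F","P","S","Cl","Br","I",
  "B","Si","Se","Sb","Te","Mo","Co","V","Cu","Pd"]

-- ===== PORT A =====
def hill_string (atoms : List (String × Int)) : String :=
  let rest0 := PySem.Dict.ofList atoms
  -- rest.pop("C", 0) / rest.pop("H", 0): read with default, then remove the key
  let c := rest0.getD "C" 0
  let rest1 := rest0.erase "C"
  let h := rest1.getD "H" 0
  let rest2 := rest1.erase "H"
  let parts0 : List String := if c ≠ 0 then ["C" ++ (if 1 < c then PySem.Int.toStr c else "")] else []
  let parts1 : List String := if h ≠ 0 then parts0 ++ ["H" ++ (if 1 < h then PySem.Int.toStr h else "")] else parts0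
  let st := pvHILL.foldl
    (fun (st : List String × PySem.Dict String Int) e =>
      if e = "C" ∨ e = "H" then st
      else
        let n := st.2.getD e 0
        let rest := st.2.erase e
        (if n ≠ 0 then st.1 ++ [e ++ (if 1 < n then PySem.Int.toStr n else "")] else st.1, rest))
    (parts1, rest2)
  -- for e in sorted(rest): n = rest[e]  (e is a key of rest, so rest[e] never raises; ported as get-with-default)
  let parts2 := (PySem.List.sorted st.2.keys (fun x => x) false).foldl
    (fun acc e =>
      let n := st.2.getD e 0
      if n ≠ 0 then acc ++ [e ++ (if 1 < n then PySem.Int.toStr n else "")] else acc)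
    st.1
  if parts2 ≠ [] then PySem.Str.join "" parts2 else ""

-- ===== PORT B =====
-- rank = {e: i for i, e in enumerate(HILL_ORDER)}
def pvRank : PySem.Dict String Int :=
  PySem.Dict.ofList ((PySem.List.enumerate pvHILL 0).map (fun p => (p.2, p.1)))

-- key(item) = str(rank.get(e, len(HILL_ORDER))).zfill(2) + e
def pvKey (item : String × Int) : String :=
  PySem.Str.zfill (PySem.Int.toStr (pvRank.getD item.1 (Int.ofNat pvHILL.length))) 2 ++ item.1

def hill_string_alt (atoms : List (String × Int)) : String :=
  PySem.Str.join ""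
    (((PySem.List.sorted (PySem.Dict.ofList atoms).items pvKey false).filter
        (fun p => p.2 != 0)).map
      (fun p => p.1 ++ (if 1 < p.2 then PySem.Int.toStr p.2 else "")))

-- ===== PRECONDITION & SPEC =====
def Spec_hill_string (atoms : List (String × Int)) (out : String) : Prop := out = hill_string_alt atoms
instance (atoms : List (String × Int)) (out : String) : Decidable (Spec_hill_string atoms out) := by unfold Spec_hill_string; infer_instance

-- ===== CLAIM (what is proved, stated in full; the proofs are below) =====
def Claim_equal_hill_string : Prop := ∀ (atoms : List (String × Int)), Dom_hill_string atoms → Spec_hill_string atoms (hill_string atoms)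

-- ===== LEMMAS AND PROOFS =====

def pvF (e : String) (n : Int) : String := e ++ (if 1 < n then PySem.Int.toStr n else "")

theorem pv_find?_filter (l : List (String × Int)) (k : String) (q : String × Int → Bool)
    (h : ∀ p : String × Int, p.1 = k → q p = true) :
    (l.filter q).find? (fun p => p.1 == k) = l.find? (fun p => p.1 == k) := by
  induction l with
  | nil => rfl
  | cons p l ih =>
    by_cases hk : p.1 = k
    · have hb : ((fun p : String × Int => p.1 == k) p) = true := by simp [hk]
      rw [List.filter_cons, if_pos (h p hk)]
      simp only [List.find?_cons, hb]
    · have hb : ((fun p : String × Int => p.1 == k) p) = false := by simp [hk]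
      rw [List.filter_cons]
      by_cases hq : q p = true
      · rw [if_pos hq]
        simp only [List.find?_cons, hb]
        exact ih
      · rw [if_neg hq, ih]
        simp only [List.find?_cons, hb]

theorem pv_get?_erase_of_ne (d : PySem.Dict String Int) (k k' : String) (h : k' ≠ k) :
    (d.erase k).get? k' = d.get? k' := by
  show ((d.items.filter (fun p => !(p.1 == k))).find? (fun p => p.1 == k')).map (·.2)
      = (d.items.find? (fun p => p.1 == k')).map (·.2)
  rw [pv_find?_filter]
  intro p hp
  simp [hp, h]

theorem pv_getD_erase_of_ne (d : PySem.Dict String Int) (k k' : String) (h : k' ≠ k) :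
    (d.erase k).getD k' 0 = d.getD k' 0 := by
  simp [PySem.Dict.getD, pv_get?_erase_of_ne d k k' h]

theorem pv_items_foldl_erase (es : List String) (d : PySem.Dict String Int) :
    ((es.foldl (fun (r : PySem.Dict String Int) e => r.erase e) d)).items
      = d.items.filter (fun p => !decide (p.1 ∈ es)) := by
  induction es generalizing d with
  | nil => simp
  | cons e es ih =>
    rw [List.foldl_cons, ih]
    show ((d.items.filter (fun p => !(p.1 == e))).filter _) = _
    rw [List.filter_filter]
    apply List.filter_congr
    intro p _
    by_cases h1 : p.1 = e <;> by_cases h2 : p.1 ∈ es <;> simp [h1, h2]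
theorem pv_loopA (es : List String) (hnd : es.Nodup) :
    ∀ (acc : List String) (r : PySem.Dict String Int),
    es.foldl
      (fun (st : List String × PySem.Dict String Int) e =>
        if e = "C" ∨ e = "H" then st
        else
          (if st.2.getD e 0 ≠ 0 then st.1 ++ [e ++ (if 1 < st.2.getD e 0 then PySem.Int.toStr (st.2.getD e 0) else "")] else st.1,
           st.2.erase e))
      (acc, r)
    = (acc ++ ((es.filter (fun e => !decide (e = "C" ∨ e = "H") && decide (r.getD e 0 ≠ 0))).map
          (fun e => pvF e (r.getD e 0))),
       (es.filter (fun e => !decide (e = "C" ∨ e = "H"))).foldl (fun (r : PySem.Dict String Int) e => r.erase e) r) := by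
  induction es with
  | nil => intro acc r; simp
  | cons e es ih =>
    intro acc r
    rw [List.foldl_cons]
    by_cases hch : e = "C" ∨ e = "H"
    · rw [if_pos hch, ih hnd.of_cons acc r, List.filter_cons, List.filter_cons]
      simp [hch]
    · rw [if_neg hch]
      have hrw : ∀ e' ∈ es, (r.erase e).getD e' 0 = r.getD e' 0 := by
        intro e' he'
        exact pv_getD_erase_of_ne r e e' (by rintro rfl; exact (List.nodup_cons.mp hnd).1 he')
      rw [ih hnd.of_cons _ (r.erase e)]
      rw [List.filter_cons, List.filter_cons]
      have hc1 : (!decide (e = "C" ∨ e = "H") && decide (r.getD e 0 ≠ 0)) = decide (r.getD e 0 ≠ 0) := by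
        simp [hch]
      rw [hc1]
      have hfe : es.filter (fun e' => !decide (e' = "C" ∨ e' = "H") && decide ((r.erase e).getD e' 0 ≠ 0))
          = es.filter (fun e' => !decide (e' = "C" ∨ e' = "H") && decide (r.getD e' 0 ≠ 0)) := by
        apply List.filter_congr
        intro x hx
        rw [hrw x hx]
      have hme : ∀ (l : List String), (∀ x ∈ l, x ∈ es) →
          l.map (fun e' => pvF e' ((r.erase e).getD e' 0)) = l.map (fun e' => pvF e' (r.getD e' 0)) := by
        intro l hl
        apply List.map_congr_left
        intro x hx
        rw [hrw x (hl x hx)]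
      by_cases hn : r.getD e 0 ≠ 0
      · rw [if_pos hn, hfe, hme _ (fun x hx => (List.mem_filter.mp hx).1)]
        simp [pvF, hn, List.append_assoc]
        have h2 : ¬e = "C" ∧ ¬e = "H" := ⟨fun h => hch (Or.inl h), fun h => hch (Or.inr h)⟩
        rw [if_pos h2, List.foldl_cons]
      · rw [if_neg hn, hfe, hme _ (fun x hx => (List.mem_filter.mp hx).1)]
        simp [pvF, hn]
        have h2 : ¬e = "C" ∧ ¬e = "H" := ⟨fun h => hch (Or.inl h), fun h => hch (Or.inr h)⟩
        rw [if_pos h2, List.foldl_cons]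

theorem pv_mem_pvHILL_iff (s : String) :
    s ∈ pvHILL ↔ s = "C" ∨ s = "H" ∨ s ∈ pvHILL.filter (fun e => !decide (e = "C" ∨ e = "H")) := by
  simp only [List.mem_filter, Bool.not_eq_eq_eq_not, Bool.not_true, decide_eq_false_iff_not]
  by_cases h1 : s = "C"
  · simp [h1, pvHILL]
  · by_cases h2 : s = "H"
    · simp [h2, pvHILL]
    · constructor
      · intro hm; exact Or.inr (Or.inr ⟨hm, by tauto⟩)
      · rintro (rfl | rfl | ⟨hm, _⟩) <;> first | exact hm | simp [pvHILL]

theorem pv_R_items (atoms : List (String × Int)) :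
    ((pvHILL.filter (fun e => !decide (e = "C" ∨ e = "H"))).foldl
        (fun (r : PySem.Dict String Int) e => r.erase e)
        (((PySem.Dict.ofList atoms).erase "C").erase "H")).items
      = (PySem.Dict.ofList atoms).items.filter (fun p => !decide (p.1 ∈ pvHILL)) := by
  rw [pv_items_foldl_erase]
  show (((PySem.Dict.ofList atoms).items.filter _).filter _).filter _ = _
  rw [List.filter_filter, List.filter_filter]
  apply List.filter_congr
  intro p _
  rcases Classical.em (p.1 ∈ pvHILL) with hm | hm
  · rcases (pv_mem_pvHILL_iff p.1).mp hm with h | h | h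
    · simp [h, hm, show ("C":String) ∈ pvHILL from by decide]
    · simp [h, hm, show ("H":String) ∈ pvHILL from by decide]
    · have hch : ¬(p.1 = "C" ∨ p.1 = "H") := by simpa using (List.mem_filter.mp h).2
      have hc1 : ¬p.1 = "C" := fun hc => hch (Or.inl hc)
      have hc2 : ¬p.1 = "H" := fun hc => hch (Or.inr hc)
      simp [h, hm, hc1, hc2]
  · have h1 : p.1 ≠ "C" := fun h => hm ((pv_mem_pvHILL_iff p.1).mpr (Or.inl h))
    have h2 : p.1 ≠ "H" := fun h => hm ((pv_mem_pvHILL_iff p.1).mpr (Or.inr (Or.inl h)))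
    have h3 : p.1 ∉ pvHILL.filter (fun e => !decide (e = "C" ∨ e = "H")) :=
      fun h => hm ((pv_mem_pvHILL_iff p.1).mpr (Or.inr (Or.inr h)))
    simp [h1, h2, h3, hm]

-- getD on the leftover dict agrees with the full dict on unknown keys
theorem pv_getD_R (d : PySem.Dict String Int) (Rd : PySem.Dict String Int)
    (hR : Rd.items = d.items.filter (fun p => !decide (p.1 ∈ pvHILL)))
    (e : String) (he : e ∉ pvHILL) :
    Rd.getD e 0 = d.getD e 0 := by
  have : Rd.get? e = d.get? e := by
    show (Rd.items.find? (fun p => p.1 == e)).map (·.2) = _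
    rw [hR, pv_find?_filter]
    · rfl
    · intro p hp; simp [hp, he]
  simp [PySem.Dict.getD, this]

theorem pv_A_assemble (d R : PySem.Dict String Int) (P : List String)
    (hR : R.items = d.items.filter (fun p => !decide (p.1 ∈ pvHILL))) :
    (if (PySem.List.sorted R.keys (fun x => x) false).foldl
          (fun acc e =>
            if R.getD e 0 ≠ 0 then acc ++ [e ++ (if 1 < R.getD e 0 then PySem.Int.toStr (R.getD e 0) else "")]
            else acc) P ≠ []
     then PySem.Str.join ""
            ((PySem.List.sorted R.keys (fun x => x) false).foldl
              (fun acc e =>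
                if R.getD e 0 ≠ 0 then acc ++ [e ++ (if 1 < R.getD e 0 then PySem.Int.toStr (R.getD e 0) else "")]
                else acc) P)
     else "")
    = PySem.Str.join ""
        (P ++ ((PySem.List.sorted ((d.items.filter (fun p => !decide (p.1 ∈ pvHILL))).map Prod.fst)
                  (fun x => x) false).filter (fun e => decide (d.getD e 0 ≠ 0))).map
            (fun e => pvF e (d.getD e 0))) := by
  have hkeys : R.keys = (d.items.filter (fun p => !decide (p.1 ∈ pvHILL))).map Prod.fst := by
    show R.items.map _ = _
    rw [hR]
  have hmem : ∀ e ∈ PySem.List.sorted R.keys (fun x => x) false, e ∉ pvHILL := by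
    intro e he
    rw [PySem.List.mem_sorted, hkeys] at he
    obtain ⟨p, hp, rfl⟩ := List.mem_map.mp he
    simpa using (List.mem_filter.mp hp).2
  have hloop := PySem.List.foldl_append_ite (fun e => R.getD e 0 ≠ 0)
      (fun e => e ++ (if 1 < R.getD e 0 then PySem.Int.toStr (R.getD e 0) else ""))
      (PySem.List.sorted R.keys (fun x => x) false) P
  rw [hloop]
  have hfix : (List.filter (fun e => decide (R.getD e 0 ≠ 0)) (PySem.List.sorted R.keys (fun x => x) false)).map
        (fun e => e ++ (if 1 < R.getD e 0 then PySem.Int.toStr (R.getD e 0) else ""))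
      = ((PySem.List.sorted ((d.items.filter (fun p => !decide (p.1 ∈ pvHILL))).map Prod.fst)
            (fun x => x) false).filter (fun e => decide (d.getD e 0 ≠ 0))).map
          (fun e => pvF e (d.getD e 0)) := by
    rw [← hkeys]
    rw [List.filter_congr (fun e he => by rw [pv_getD_R _ _ hR e (hmem e he)])]
    apply List.map_congr_left
    intro e he
    rw [pv_getD_R _ _ hR e (hmem e (List.mem_filter.mp he).1)]
    rfl
  rw [hfix]
  by_cases hnil : P ++ ((PySem.List.sorted ((d.items.filter (fun p => !decide (p.1 ∈ pvHILL))).map Prod.fst)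
      (fun x => x) false).filter (fun e => decide (d.getD e 0 ≠ 0))).map (fun e => pvF e (d.getD e 0)) = []
  · rw [hnil]; rfl
  · rw [if_pos hnil]

def pvTail : List String := ["N","O","F","P","S","Cl","Br","I","B","Si","Se","Sb","Te","Mo","Co","V","Cu","Pd"]

theorem pv_prefix (d : PySem.Dict String Int) :
    ((if (d.erase "C").getD "H" 0 ≠ 0 then
        (if d.getD "C" 0 ≠ 0 then
            ["C" ++ if 1 < d.getD "C" 0 then PySem.Int.toStr (d.getD "C" 0) else ""]
          else []) ++
          ["H" ++ if 1 < (d.erase "C").getD "H" 0 then PySem.Int.toStr ((d.erase "C").getD "H" 0) else ""]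
      else
        if d.getD "C" 0 ≠ 0 then
          ["C" ++ if 1 < d.getD "C" 0 then PySem.Int.toStr (d.getD "C" 0) else ""]
        else []) ++
      List.map (fun e => pvF e (((d.erase "C").erase "H").getD e 0))
        (List.filter (fun e => !decide (e = "C" ∨ e = "H") && decide (((d.erase "C").erase "H").getD e 0 ≠ 0)) pvHILL))
    = List.map (fun e => pvF e (d.getD e 0)) (List.filter (fun e => decide (d.getD e 0 ≠ 0)) pvHILL) := by
  have hH : (d.erase "C").getD "H" 0 = d.getD "H" 0 := pv_getD_erase_of_ne _ _ _ (by decide)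
  have htail : ∀ e : String, ¬(e = "C" ∨ e = "H") → ((d.erase "C").erase "H").getD e 0 = d.getD e 0 := by
    intro e h
    rw [pv_getD_erase_of_ne _ _ _ (fun x => h (Or.inr x)), pv_getD_erase_of_ne _ _ _ (fun x => h (Or.inl x))]
  have hnotch : ∀ e ∈ pvTail, ¬(e = "C" ∨ e = "H") := by decide
  have hfilt : List.filter (fun e => !decide (e = "C" ∨ e = "H") && decide (((d.erase "C").erase "H").getD e 0 ≠ 0)) pvHILL
      = List.filter (fun e => decide (d.getD e 0 ≠ 0)) pvTail := by
    show List.filter _ ("C" :: "H" :: pvTail) = _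
    rw [List.filter_cons, List.filter_cons]
    simp only [decide_eq_true_eq, show (decide (("C":String) = "C" ∨ ("C":String) = "H")) = true from by decide,
      show (decide (("H":String) = "C" ∨ ("H":String) = "H")) = true from by decide,
      Bool.not_true, Bool.false_and, if_neg (by simp : ¬(false = true))]
    apply List.filter_congr
    intro e he
    have h := hnotch e he
    simp [h, htail e h]
  have hmap : List.map (fun e => pvF e (((d.erase "C").erase "H").getD e 0))
        (List.filter (fun e => decide (d.getD e 0 ≠ 0)) pvTail)
      = List.map (fun e => pvF e (d.getD e 0)) (List.filter (fun e => decide (d.getD e 0 ≠ 0)) pvTail) := by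
    apply List.map_congr_left
    intro e he
    rw [htail e (hnotch e (List.mem_filter.mp he).1)]
  have hrhs : List.filter (fun e => decide (d.getD e 0 ≠ 0)) pvHILL
      = (if d.getD "C" 0 ≠ 0 then ["C"] else []) ++ (if d.getD "H" 0 ≠ 0 then ["H"] else [])
        ++ List.filter (fun e => decide (d.getD e 0 ≠ 0)) pvTail := by
    show List.filter _ ("C" :: "H" :: pvTail) = _
    rw [List.filter_cons, List.filter_cons]
    by_cases hc : d.getD "C" 0 ≠ 0 <;> by_cases hh : d.getD "H" 0 ≠ 0 <;> simp [hc, hh]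
  rw [hfilt, hmap, hrhs, List.map_append, List.map_append]
  rw [hH]
  by_cases hc : d.getD "C" 0 ≠ 0 <;> by_cases hh : d.getD "H" 0 ≠ 0 <;>
    simp [hc, hh, pvF, List.append_assoc]

set_option maxHeartbeats 1000000 in
theorem pv_A_eq (atoms : List (String × Int)) :
    hill_string atoms =
      PySem.Str.join ""
        (((pvHILL.filter (fun e => decide ((PySem.Dict.ofList atoms).getD e 0 ≠ 0))).map
            (fun e => pvF e ((PySem.Dict.ofList atoms).getD e 0)))
         ++ ((PySem.List.sorted (((PySem.Dict.ofList atoms).items.filter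
                (fun p => !decide (p.1 ∈ pvHILL))).map Prod.fst) (fun x => x) false).filter
              (fun e => decide ((PySem.Dict.ofList atoms).getD e 0 ≠ 0))).map
            (fun e => pvF e ((PySem.Dict.ofList atoms).getD e 0))) := by
  simp only [hill_string, pv_loopA pvHILL (by decide)]
  rw [pv_A_assemble (PySem.Dict.ofList atoms) _ _ (pv_R_items atoms)]
  rw [pv_prefix]

set_option maxRecDepth 4000 in
theorem pvRank_keys : pvRank.keys = pvHILL := by decide

theorem pv_pvKey_fst (p : String × Int) : pvKey p = pvKey (p.1, 0) := rfl

theorem pv_pvKey_unknown (e : String) (n : Int) (he : e ∉ pvHILL) :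
    pvKey (e, n) = "20" ++ e := by
  have h0 : pvRank.get? e = none := by
    rw [PySem.Dict.get?_eq_none_iff_not_mem_keys, pvRank_keys]; exact he
  show PySem.Str.zfill (PySem.Int.toStr (pvRank.getD e (Int.ofNat pvHILL.length))) 2 ++ e = _
  rw [PySem.Dict.getD_of_get?_eq_none _ _ h0]
  rfl

theorem pv_kp : pvHILL.Pairwise (fun a b => pvKey (a, 0) < pvKey (b, 0)) := by
  have h : pvHILL.Pairwise (fun a b => (pvKey (a, 0)).toList < (pvKey (b, 0)).toList) := by
    set_option maxRecDepth 8000 in decide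
  exact h.imp (fun hab => String.lt_iff_toList_lt.mpr hab)

theorem pv_klt2 : ∀ e ∈ pvHILL, pvKey (e, 0) < "2" := by
  have h : ∀ e ∈ pvHILL, (pvKey (e, 0)).toList < ['2'] := by
    set_option maxRecDepth 8000 in decide
  intro e he
  exact String.lt_iff_toList_lt.mpr (h e he)

theorem pv_toList_20 (t : String) : ("20" ++ t).toList = '2' :: '0' :: t.toList := by
  rw [String.toList_append]; rfl

theorem pv_lt_20 (t : String) : ("2" : String) < "20" ++ t := by
  rw [String.lt_iff_toList_lt, pv_toList_20]
  show ('2' : Char) :: ([] : List Char) < _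
  rw [List.cons_lt_cons_iff]
  exact Or.inr ⟨rfl, List.nil_lt_cons _ _⟩

theorem pv_20_mono (s t : String) : ("20" ++ s) < ("20" ++ t) ↔ s < t := by
  rw [String.lt_iff_toList_lt, pv_toList_20, pv_toList_20,
    List.cons_lt_cons_iff, List.cons_lt_cons_iff, String.lt_iff_toList_lt]
  simp [lt_irrefl]

theorem pv_20_inj (s t : String) (h : ("20" ++ s) = ("20" ++ t)) : s = t := by
  have := congrArg String.toList h
  rw [pv_toList_20, pv_toList_20] at this
  exact String.toList_inj.mp (by injection this with _ h2; injection h2)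

-- the known (Hill-ordered) items of d
def pvK (d : PySem.Dict String Int) : List (String × Int) :=
  pvHILL.filterMap (fun e => (d.get? e).map (fun n => (e, n)))

theorem pv_mem_K (d : PySem.Dict String Int) (p : String × Int) :
    p ∈ pvK d ↔ p.1 ∈ pvHILL ∧ d.get? p.1 = some p.2 := by
  unfold pvK
  rw [List.mem_filterMap]
  constructor
  · rintro ⟨e, he, hp⟩
    obtain ⟨n, hn, rfl⟩ := Option.map_eq_some_iff.mp hp
    exact ⟨he, hn⟩
  · rintro ⟨he, hg⟩
    exact ⟨p.1, he, by rw [hg]; rfl⟩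

theorem pv_K_pairwise (d : PySem.Dict String Int) :
    (pvK d).Pairwise (fun p q => pvKey p < pvKey q) := by
  unfold pvK
  rw [List.pairwise_filterMap]
  apply pv_kp.imp
  intro a b hab p hp q hq
  obtain ⟨n, -, rfl⟩ := Option.map_eq_some_iff.mp hp
  obtain ⟨m, -, rfl⟩ := Option.map_eq_some_iff.mp hq
  exact hab

theorem pv_K_nodup (d : PySem.Dict String Int) : (pvK d).Nodup := by
  exact (pv_K_pairwise d).imp (fun h => by rintro rfl; exact lt_irrefl _ h)

theorem pv_items_nodup (atoms : List (String × Int)) : (PySem.Dict.ofList atoms).items.Nodup := by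
  have h : ((PySem.Dict.ofList atoms).items.map (fun x => x.1)).Nodup := PySem.Dict.nodup_keys_ofList atoms
  exact List.Nodup.of_map _ h

theorem pv_U_fst_nodup (atoms : List (String × Int)) :
    (((PySem.Dict.ofList atoms).items.filter (fun p => !decide (p.1 ∈ pvHILL))).map Prod.fst).Nodup := by
  exact (List.Sublist.map Prod.fst List.filter_sublist).nodup (PySem.Dict.nodup_keys_ofList atoms)

theorem pv_sortedU_pairwise (atoms : List (String × Int)) :
    (PySem.List.sorted ((PySem.Dict.ofList atoms).items.filter (fun p => !decide (p.1 ∈ pvHILL))) pvKey false).Pairwise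
      (fun p q => pvKey p < pvKey q) := by
  set U := (PySem.Dict.ofList atoms).items.filter (fun p => !decide (p.1 ∈ pvHILL)) with hU
  have hUnd : U.Nodup := (pv_items_nodup atoms).filter _
  have hsnd : (PySem.List.sorted U pvKey false).Nodup :=
    (PySem.List.sorted_perm U pvKey false).symm.nodup hUnd
  have hle := PySem.List.sorted_pairwise U pvKey
  refine (hle.and hsnd).imp_of_mem ?_
  intro a b ha hb ⟨hab, hne⟩
  refine lt_of_le_of_ne hab (fun hk => hne ?_)
  have haU := (PySem.List.mem_sorted U pvKey false a).mp ha
  have hbU := (PySem.List.mem_sorted U pvKey false b).mp hb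
  have ha' : a.1 ∉ pvHILL := by simpa using (List.mem_filter.mp haU).2
  have hb' : b.1 ∉ pvHILL := by simpa using (List.mem_filter.mp hbU).2
  rw [show pvKey a = "20" ++ a.1 from pv_pvKey_unknown a.1 a.2 ha',
      show pvKey b = "20" ++ b.1 from pv_pvKey_unknown b.1 b.2 hb'] at hk
  have hfst : a.1 = b.1 := pv_20_inj _ _ hk
  exact List.inj_on_of_nodup_map (pv_U_fst_nodup atoms) haU hbU hfst

theorem pv_sorted_split (atoms : List (String × Int)) :
    PySem.List.sorted (PySem.Dict.ofList atoms).items pvKey false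
      = pvK (PySem.Dict.ofList atoms)
        ++ PySem.List.sorted ((PySem.Dict.ofList atoms).items.filter (fun p => !decide (p.1 ∈ pvHILL))) pvKey false := by
  set d := PySem.Dict.ofList atoms with hd
  apply PySem.List.sorted_eq_of_perm_of_pairwise_lt
  · -- permutation
    have hKperm : (pvK d).Perm (d.items.filter (fun p => decide (p.1 ∈ pvHILL))) := by
      rw [List.perm_ext_iff_of_nodup (pv_K_nodup d) ((pv_items_nodup atoms).filter _)]
      intro p
      rw [pv_mem_K, List.mem_filter,
        PySem.Dict.get?_eq_some_iff_mem_items d p.1 p.2 (by rw [hd]; exact PySem.Dict.nodup_keys_ofList atoms)]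
      constructor
      · rintro ⟨h1, h2⟩; exact ⟨h2, by simpa using h1⟩
      · rintro ⟨h2, h1⟩; exact ⟨by simpa using h1, h2⟩
    exact (hKperm.append (PySem.List.sorted_perm _ pvKey false)).trans
      (List.filter_append_perm (fun p => decide (p.1 ∈ pvHILL)) d.items)
  · -- pairwise
    rw [List.pairwise_append]
    refine ⟨pv_K_pairwise d, pv_sortedU_pairwise atoms, ?_⟩
    intro a ha b hb
    have ha' : a.1 ∈ pvHILL := ((pv_mem_K d a).mp ha).1
    have hbU := (PySem.List.mem_sorted _ pvKey false b).mp hb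
    have hb' : b.1 ∉ pvHILL := by simpa using (List.mem_filter.mp hbU).2
    calc pvKey a = pvKey (a.1, 0) := pv_pvKey_fst a
      _ < "2" := pv_klt2 a.1 ha'
      _ < "20" ++ b.1 := pv_lt_20 b.1
      _ = pvKey b := (pv_pvKey_unknown b.1 b.2 hb').symm

theorem pv_sorted_fst (atoms : List (String × Int)) :
    PySem.List.sorted (((PySem.Dict.ofList atoms).items.filter (fun p => !decide (p.1 ∈ pvHILL))).map Prod.fst)
        (fun x => x) false
      = (PySem.List.sorted ((PySem.Dict.ofList atoms).items.filter (fun p => !decide (p.1 ∈ pvHILL))) pvKey false).map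
          Prod.fst := by
  apply PySem.List.sorted_eq_of_perm_of_pairwise_lt
  · exact (PySem.List.sorted_perm _ pvKey false).map Prod.fst
  · rw [List.pairwise_map]
    refine (pv_sortedU_pairwise atoms).imp_of_mem ?_
    intro a b ha hb hab
    have ha' : a.1 ∉ pvHILL := by
      simpa using (List.mem_filter.mp ((PySem.List.mem_sorted _ pvKey false a).mp ha)).2
    have hb' : b.1 ∉ pvHILL := by
      simpa using (List.mem_filter.mp ((PySem.List.mem_sorted _ pvKey false b).mp hb)).2
    rw [show pvKey a = "20" ++ a.1 from pv_pvKey_unknown a.1 a.2 ha',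
        show pvKey b = "20" ++ b.1 from pv_pvKey_unknown b.1 b.2 hb'] at hab
    exact (pv_20_mono _ _).mp hab

theorem pv_known_side (d : PySem.Dict String Int) (es : List String) :
    ((es.filterMap (fun e => (d.get? e).map (fun n => (e, n)))).filter (fun p => p.2 != 0)).map
        (fun p => p.1 ++ (if 1 < p.2 then PySem.Int.toStr p.2 else ""))
      = (es.filter (fun e => decide (d.getD e 0 ≠ 0))).map (fun e => pvF e (d.getD e 0)) := by
  induction es with
  | nil => rfl
  | cons e es ih =>
    rw [List.filterMap_cons, List.filter_cons]
    cases hg : d.get? e with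
    | none =>
      have h0 : d.getD e 0 = 0 := PySem.Dict.getD_of_get?_eq_none d 0 hg
      simp only [hg, Option.map_none, h0, ne_eq, not_true_eq_false, decide_false,
        Bool.false_eq_true, if_false, ih]
    | some n =>
      have h0 : d.getD e 0 = n := PySem.Dict.getD_of_get?_eq_some d 0 hg
      simp only [hg, Option.map_some]
      by_cases hn : n = 0
      · simp [h0, hn, ih]
      · simp [h0, hn, ih, pvF]

theorem pv_val_side (d : PySem.Dict String Int) :
    ∀ (l : List (String × Int)), (∀ p ∈ l, d.getD p.1 0 = p.2) →
    ((l.map Prod.fst).filter (fun e => decide (d.getD e 0 ≠ 0))).map (fun e => pvF e (d.getD e 0))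
      = (l.filter (fun p => p.2 != 0)).map (fun p => p.1 ++ (if 1 < p.2 then PySem.Int.toStr p.2 else "")) := by
  intro l
  induction l with
  | nil => intro _; rfl
  | cons p l ih =>
    intro h
    have hp := h p List.mem_cons_self
    have hrest : ∀ q ∈ l, d.getD q.1 0 = q.2 := fun q hq => h q (List.mem_cons_of_mem _ hq)
    have ih' := ih hrest
    simp only [pvF, ne_eq, decide_not] at ih'
    rw [List.map_cons, List.filter_cons, List.filter_cons]
    by_cases hn : p.2 = 0
    · simp [hp, hn, pvF, ih']
    · simp [hp, hn, pvF, ih']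

theorem pv_B_eq (atoms : List (String × Int)) :
    hill_string_alt atoms =
      PySem.Str.join ""
        (((pvHILL.filter (fun e => decide ((PySem.Dict.ofList atoms).getD e 0 ≠ 0))).map
            (fun e => pvF e ((PySem.Dict.ofList atoms).getD e 0)))
         ++ ((PySem.List.sorted (((PySem.Dict.ofList atoms).items.filter
                (fun p => !decide (p.1 ∈ pvHILL))).map Prod.fst) (fun x => x) false).filter
              (fun e => decide ((PySem.Dict.ofList atoms).getD e 0 ≠ 0))).map
            (fun e => pvF e ((PySem.Dict.ofList atoms).getD e 0))) := by
  have hvals : ∀ p ∈ PySem.List.sorted ((PySem.Dict.ofList atoms).items.filter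
      (fun p => !decide (p.1 ∈ pvHILL))) pvKey false, (PySem.Dict.ofList atoms).getD p.1 0 = p.2 := by
    intro p hp
    obtain ⟨a, b⟩ := p
    have hmem : (a, b) ∈ (PySem.Dict.ofList atoms).items :=
      (List.mem_filter.mp ((PySem.List.mem_sorted _ pvKey false (a, b)).mp hp)).1
    exact PySem.Dict.getD_of_mem_items _ hmem (PySem.Dict.nodup_keys_ofList atoms) 0
  rw [hill_string_alt, pv_sorted_split atoms, List.filter_append, List.map_append]
  have hknown := pv_known_side (PySem.Dict.ofList atoms) pvHILL
  rw [pv_sorted_fst atoms, pv_val_side (PySem.Dict.ofList atoms) _ hvals]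
  unfold pvK
  rw [hknown]

-- ===== VERDICT (by name: the statement is the Claim_ definition above) =====
theorem hill_string_spec : Claim_equal_hill_string := by
  intro atoms _
  show hill_string atoms = hill_string_alt atoms
  rw [pv_A_eq, pv_B_eq]
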